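-- pv_equiv track=rewrite | github.com/kamyu104/LeetCode-Solutions | Python/smallest-pair-with-different-frequencies.py | minDistinctFreqPair
-- ===== SOURCE A (Python) =====
-- import collections
--
-- def minDistinctFreqPair(nums):
--     """
--     :type nums: List[int]
--     :rtype: List[int]
--     """
--     INF = float("inf")
--     cnt = collections.defaultdict(int)
--     for x in nums:
--         cnt[x] += 1
--     x = min(nums)
--     mn = INF
--     for y in nums:
--         if cnt[y] != cnt[x]:
--             mn = min(mn, y)
--     return [x, mn] if mn is not INF else [-1, -1]
-- ===== SOURCE B (Python) =====
-- import collections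
--
-- def minDistinctFreqPair(nums):
--     cnt = collections.Counter(nums)
--     x = min(nums)
--     cx = cnt[x]
--     for y in sorted(nums):
--         if cnt[y] != cx:
--             return [x, y]
--     return [-1, -1]
-- ===== Notes on version B (the rewrite author's own statement) =====
-- stated objective: alternative
-- what changed: Replaces A's running-minimum accumulation over all differing-frequency elements with a Counter plus a sort-then-scan that returns at the FIRST element (in sorted order) whose frequency differs from min(nums)'s.
import Mathlib
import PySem

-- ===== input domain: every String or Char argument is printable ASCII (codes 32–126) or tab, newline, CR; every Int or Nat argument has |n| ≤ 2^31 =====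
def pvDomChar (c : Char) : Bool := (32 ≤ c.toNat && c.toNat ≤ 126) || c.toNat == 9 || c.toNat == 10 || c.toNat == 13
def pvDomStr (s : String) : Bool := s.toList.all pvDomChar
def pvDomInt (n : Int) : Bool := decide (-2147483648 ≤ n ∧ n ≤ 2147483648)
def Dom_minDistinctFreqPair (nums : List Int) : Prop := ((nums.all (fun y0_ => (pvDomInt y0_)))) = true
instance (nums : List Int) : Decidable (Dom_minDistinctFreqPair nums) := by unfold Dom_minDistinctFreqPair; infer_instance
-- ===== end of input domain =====

-- B replaces A's running-minimum scan by a sort-then-first-match scan; equal return value proved on nonempty lists.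

-- ===== PORT A =====
-- cnt = defaultdict(int); for x in nums: cnt[x] += 1; x = min(nums); mn-loop; return
def minDistinctFreqPair (nums : List Int) : List Int :=
  let cnt : PySem.Dict Int Int := nums.foldl (fun d x => d.modify x 0 (· + 1)) PySem.Dict.empty
  match PySem.List.min? nums (fun y => y) with
  | none => []   -- unreachable under Pre_: min([]) raises ValueError
  | some x =>
    -- mn = INF; for y in nums: if cnt[y] != cnt[x]: mn = min(mn, y)   (none plays INF)
    let mn := nums.foldl
      (fun mn y => if cnt.getD y 0 ≠ cnt.getD x 0 then
          some (match mn with | none => y | some m => min m y) else mn)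
      (none : Option Int)
    match mn with
    | some m => [x, m]
    | none => [-1, -1]

-- ===== PORT B =====
def minDistinctFreqPair_alt (nums : List Int) : List Int :=
  let cnt := PySem.Dict.counter nums
  match PySem.List.min? nums (fun y => y) with
  | none => []   -- unreachable under Pre_: min([]) raises ValueError
  | some x =>
    let cx := cnt.getD x 0
    match (PySem.List.sorted nums (fun y => y) false).find? (fun y => cnt.getD y 0 != cx) with
    | some y => [x, y]
    | none => [-1, -1]

-- ===== PRECONDITION & SPEC =====
-- A raises ValueError on the empty list (min of empty sequence); Pre_ excludes exactly that input.
def Pre_minDistinctFreqPair (nums : List Int) : Prop := nums ≠ []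
instance (nums : List Int) : Decidable (Pre_minDistinctFreqPair nums) := by unfold Pre_minDistinctFreqPair; infer_instance
def pvWitness_minDistinctFreqPair : List Int := [1, 2, 2]

def Spec_minDistinctFreqPair (nums : List Int) (out : List Int) : Prop := out = minDistinctFreqPair_alt nums
instance (nums : List Int) (out : List Int) : Decidable (Spec_minDistinctFreqPair nums out) := by unfold Spec_minDistinctFreqPair; infer_instance

-- ===== CLAIM (what is proved, stated in full; the proofs are below) =====
def Claim_equal_minDistinctFreqPair : Prop := ∀ (nums : List Int), Dom_minDistinctFreqPair nums → Pre_minDistinctFreqPair nums → Spec_minDistinctFreqPair nums (minDistinctFreqPair nums)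

-- ===== LEMMAS AND PROOFS =====

-- running min with a `some` accumulator is foldl min
theorem foldl_someMin (l : List Int) (a : Int) :
    l.foldl (fun mn y => some (match mn with | none => y | some m => min m y)) (some a)
      = some (l.foldl min a) := by
  induction l generalizing a with
  | nil => rfl
  | cons b t ih => simpa using ih (min a b)

-- A's guarded running-min loop computes min? of the filtered list
theorem foldA_eq_min?_filter (p : Int → Bool) (l : List Int) :
    l.foldl (fun mn y => if p y then
        some (match mn with | none => y | some m => min m y) else mn) (none : Option Int)
      = (l.filter p).min? := by
  rw [← List.foldl_filter]
  cases h : l.filter p with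
  | nil => rfl
  | cons a t => simp [List.min?, foldl_someMin]

theorem foldl_min_of_le (l : List Int) (a : Int) (h : ∀ y ∈ l, a ≤ y) :
    l.foldl min a = a := by
  induction l with
  | nil => rfl
  | cons b t ih =>
    have : min a b = a := min_eq_left (h b (by simp))
    simp only [List.foldl_cons, this]
    exact ih (fun y hy => h y (by simp [hy]))

-- on a ≤-sorted list, the first match of p is min? of the filtered list
theorem find?_sorted_eq_min?_filter (p : Int → Bool) (l : List Int)
    (h : l.Pairwise (· ≤ ·)) : l.find? p = (l.filter p).min? := by
  induction l with
  | nil => rfl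
  | cons a t ih =>
    rcases List.pairwise_cons.mp h with ⟨ha, ht⟩
    by_cases hp : p a
    · simp only [List.find?_cons_of_pos hp, List.filter_cons_of_pos hp, List.min?]
      have : (t.filter p).foldl min a = a :=
        foldl_min_of_le _ _ (fun y hy => ha y (List.mem_of_mem_filter hy))
      simp [this]
    · simp only [List.find?_cons_of_neg hp, List.filter_cons_of_neg hp]
      exact ih ht

theorem min?_eq_of_perm (l l' : List Int) (h : l.Perm l') : l.min? = l'.min? := by
  cases hl : l.min? with
  | none =>
    rw [List.min?_eq_none_iff] at hl
    subst hl
    simp [List.Perm.nil_eq h |>.symm]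
  | some m =>
    rw [List.min?_eq_some_iff] at hl
    exact (List.min?_eq_some_iff.mpr ⟨h.mem_iff.mp hl.1,
      fun b hb => hl.2 b (h.mem_iff.mpr hb)⟩).symm

-- ===== VERDICT (by name: the statement is the Claim_ definition above) =====
theorem minDistinctFreqPair_spec : Claim_equal_minDistinctFreqPair := by
  intro nums _ hpre
  unfold Spec_minDistinctFreqPair minDistinctFreqPair minDistinctFreqPair_alt
  rw [← PySem.Dict.counter_eq_foldl]
  cases hmin : PySem.List.min? nums (fun y => y) with
  | none => rfl
  | some x =>
    simp only []
    set cnt := PySem.Dict.counter nums with hcnt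
    set cx := cnt.getD x 0 with hcx
    have hpred : ∀ (y : Int), (cnt.getD y 0 ≠ cx) = ((fun y => cnt.getD y 0 != cx) y = true) := by
      intro y; simp
    have hA : nums.foldl
        (fun mn y => if cnt.getD y 0 ≠ cx then
            some (match mn with | none => y | some m => min m y) else mn)
        (none : Option Int)
        = (nums.filter (fun y => cnt.getD y 0 != cx)).min? := by
      rw [← foldA_eq_min?_filter]
      congr 1
      funext mn y
      by_cases h : cnt.getD y 0 = cx <;> simp [h]
    have hB : (PySem.List.sorted nums (fun y => y) false).find? (fun y => cnt.getD y 0 != cx)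
        = (nums.filter (fun y => cnt.getD y 0 != cx)).min? := by
      rw [find?_sorted_eq_min?_filter _ _ (PySem.List.sorted_pairwise nums (fun y => y))]
      exact min?_eq_of_perm _ _ ((PySem.List.sorted_perm nums (fun y => y) false).filter _)
    rw [hA, hB]
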